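-- pv_equiv track=rewrite | github.com/verba-neo/sw-camp-2nd-algo | prgmrs/121683-외톨이알파벳/나상원.py | solution
-- ===== SOURCE A (Python) =====
-- def solution(input_string):
--     answer = ''
--
--     # 문자의 idx 를 리스트로 저장함
--     char_dict = {}
--     # 정렬을 해야되서 리스트로 저장
--     answer_list = []
--
--     for idx, char in enumerate(input_string):
--         if char not in char_dict:
--             char_dict[char] = [idx]
--         else:
--             char_dict[char].append(idx)
--
--     for ch, ch_idx in char_dict.items():
--         if len(ch_idx) >= 2:
--             for i in range(len(ch_idx) - 1):
--                 if ch_idx[i+1] - ch_idx[i] > 1: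
--                     answer_list.append(ch)
--                     break
--
--     answer_list.sort()
--     answer = ''.join(answer_list)
--
--     if len(answer_list) == 0:
--         answer += 'N'
--
--     return answer
-- ===== SOURCE B (Python) =====
-- def solution(input_string):
--     last_seen = {}
--     lonely = set()
--     for idx, char in enumerate(input_string):
--         if char in last_seen and idx - last_seen[char] > 1:
--             lonely.add(char)
--         last_seen[char] = idx
--     return ''.join(sorted(lonely)) if lonely else 'N'
-- ===== Notes on version B (the rewrite author's own statement) =====
-- stated objective: simpler
-- what changed: Replaced the build-index-lists-then-rescan-adjacent-pairs structure with a single pass over enumerate that keeps only each character's last index and adds a character to a lonely set the moment a gap > 1 to its previous occurrence appears.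
import Mathlib
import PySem

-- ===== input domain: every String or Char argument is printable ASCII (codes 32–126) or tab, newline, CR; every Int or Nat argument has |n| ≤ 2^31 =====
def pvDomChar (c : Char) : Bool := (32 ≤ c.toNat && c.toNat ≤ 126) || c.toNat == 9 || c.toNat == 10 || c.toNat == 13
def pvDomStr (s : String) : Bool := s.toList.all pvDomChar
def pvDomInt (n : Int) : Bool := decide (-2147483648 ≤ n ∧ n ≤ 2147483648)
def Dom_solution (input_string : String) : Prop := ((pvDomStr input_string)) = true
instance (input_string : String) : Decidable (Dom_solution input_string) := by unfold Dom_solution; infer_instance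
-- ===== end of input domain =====

-- B replaces A's build-index-lists-then-rescan structure by a single pass keeping only each
-- character's last index and a set of lonely characters (objective: simpler).


-- ===== PORT A =====
-- inner loop 'for i in range(len(ch_idx)-1): if ch_idx[i+1] - ch_idx[i] > 1: …; break'
-- ported as a recursion over the range list returning whether the break was hit
def aScanGap (l : List Int) : List Int → Bool
  | [] => false
  | i :: rest =>
      if PySem.List.pyGetD l (i + 1) 0 - PySem.List.pyGetD l i 0 > 1 then true
      else aScanGap l rest

-- body of A's first loop
def aStep (d : PySem.Dict Char (List Int)) (p : Int × Char) : PySem.Dict Char (List Int) :=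
  if d.contains p.2 = false then d.insert p.2 [p.1]
  else d.modify p.2 [] (fun l => l ++ [p.1])

def solution (input_string : String) : String :=
  let charDict := (PySem.List.enumerate input_string.toList 0).foldl aStep PySem.Dict.empty
  let answerList := charDict.items.foldl
    (fun acc pr =>
      if pr.2.length ≥ 2 then
        (if aScanGap pr.2 (PySem.List.pyRange 0 ((pr.2.length : Int) - 1) 1) then acc ++ [pr.1]
         else acc)
      else acc) []
  let sortedList := PySem.List.sorted answerList (fun x => x) false
  -- answer = ''.join(answer_list); if empty, answer += 'N'
  if answerList.length = 0 then String.ofList (sortedList ++ ['N']) else String.ofList sortedList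

-- ===== PORT B =====
-- body of B's single pass: (last_seen, lonely)
def bStep (st : PySem.Dict Char Int × PySem.Set Char) (p : Int × Char) :
    PySem.Dict Char Int × PySem.Set Char :=
  let lonely :=
    match st.1.get? p.2 with
    | some j => if p.1 - j > 1 then PySem.Set.add st.2 p.2 else st.2
    | none => st.2
  (st.1.insert p.2 p.1, lonely)

def solution_alt (input_string : String) : String :=
  let st := (PySem.List.enumerate input_string.toList 0).foldl bStep
      (PySem.Dict.empty, PySem.Set.empty)
  if st.2 = [] then "N" else String.ofList (PySem.List.sorted st.2 (fun x => x) false)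

-- ===== PRECONDITION & SPEC =====
def Spec_solution (input_string : String) (out : String) : Prop := out = solution_alt input_string
instance (input_string : String) (out : String) : Decidable (Spec_solution input_string out) := by unfold Spec_solution; infer_instance

-- ===== CLAIM (what is proved, stated in full; the proofs are below) =====
def Claim_equal_solution : Prop := ∀ (input_string : String), Dom_solution input_string → Spec_solution input_string (solution input_string)

-- ===== LEMMAS AND PROOFS =====

-- a character is lonely iff its (ordered) index list has an adjacent gap > 1
def gapB : List Int → Bool
  | a :: b :: r => decide (b - a > 1) || gapB (b :: r)
  | _ => false

-- coupling invariant between A's index-list dict and B's (last_seen, lonely) state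
def InvAB (d : PySem.Dict Char (List Int)) (last : PySem.Dict Char Int)
    (lonely : PySem.Set Char) : Prop :=
  d.keys.Nodup ∧
  (∀ c, d.contains c = true → d.getD c [] ≠ []) ∧
  (∀ c, last.get? c = (d.getD c []).getLast?) ∧
  (∀ c, c ∈ lonely ↔ gapB (d.getD c []) = true) ∧
  lonely.Nodup

lemma gapB_append (l : List Int) (i j : Int) (hj : l.getLast? = some j) :
    gapB (l ++ [i]) = (gapB l || decide (i - j > 1)) := by
  induction l with
  | nil => simp at hj
  | cons a t ih =>
    cases t with
    | nil => simp at hj; subst hj; simp [gapB]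
    | cons b r =>
      rw [List.getLast?_cons_cons] at hj
      have h2 := ih hj
      simp only [List.cons_append] at h2 ⊢
      rw [show gapB (a :: b :: (r ++ [i])) = (decide (b - a > 1) || gapB (b :: (r ++ [i]))) from rfl,
          h2, show gapB (a :: b :: r) = (decide (b - a > 1) || gapB (b :: r)) from rfl,
          Bool.or_assoc]

lemma inv_step (d : PySem.Dict Char (List Int)) (last : PySem.Dict Char Int)
    (lonely : PySem.Set Char) (p : Int × Char) (h : InvAB d last lonely) :
    InvAB (aStep d p) (bStep (last, lonely) p).1 (bStep (last, lonely) p).2 := by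
  obtain ⟨hnd, hne, hlast, hlon, hsnd⟩ := h
  obtain ⟨i, c⟩ := p
  by_cases hc : d.contains c = true
  · have hl : d.getD c [] ≠ [] := hne c hc
    obtain ⟨j, hj⟩ : ∃ j, (d.getD c []).getLast? = some j := by
      cases hx : (d.getD c []).getLast? with
      | none => exact absurd (List.getLast?_eq_none_iff.mp hx) hl
      | some j => exact ⟨j, rfl⟩
    have hlc : last.get? c = some j := by rw [hlast c, hj]
    simp only [aStep, bStep, hc, Bool.true_eq_false, if_false, hlc]
    refine ⟨?_, ?_, ?_, ?_, ?_⟩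
    · rw [PySem.Dict.keys_modify, PySem.Dict.keys_insert_of_contains _ _ hc]
      exact hnd
    · intro c' hc'
      by_cases h' : c' = c
      · subst h'; rw [PySem.Dict.getD_modify_self]; simp
      · rw [PySem.Dict.getD_modify_of_ne _ _ _ h']
        exact hne c' (by rwa [PySem.Dict.contains_modify, beq_false_of_ne h',
          Bool.false_or] at hc')
    · intro c'
      by_cases h' : c' = c
      · subst h'
        rw [PySem.Dict.get?_insert, if_pos rfl, PySem.Dict.getD_modify_self,
          List.getLast?_concat]
      · rw [PySem.Dict.get?_insert, if_neg h', PySem.Dict.getD_modify_of_ne _ _ _ h',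
          hlast c']
    · intro c'
      by_cases h' : c' = c
      · subst h'
        rw [PySem.Dict.getD_modify_self, gapB_append _ i j hj]
        by_cases hg : i - j > 1 <;>
          simp [hg, PySem.Set.mem_add, hlon c']
      · rw [PySem.Dict.getD_modify_of_ne _ _ _ h']
        by_cases hg : i - j > 1 <;> simp [hg, PySem.Set.mem_add, h', hlon c']
    · by_cases hg : i - j > 1 <;> simp [hg, PySem.Set.nodup_add _ _ hsnd, hsnd]
  · have hc' : d.contains c = false := by simpa using hc
    have h0 : d.getD c [] = [] := PySem.Dict.getD_of_not_contains d [] hc'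
    have hlc : last.get? c = none := by rw [hlast c, h0]; rfl
    simp only [aStep, bStep, hc', if_true, hlc]
    have hcm : c ∉ d.keys := fun m => by
      rw [(PySem.Dict.contains_iff_mem_keys d c).mpr m] at hc'; cases hc'
    refine ⟨?_, ?_, ?_, ?_, hsnd⟩
    · rw [PySem.Dict.keys_insert_of_not_contains _ _ hc']
      simp [List.nodup_append, hnd]
      intro a ha hac
      exact hcm (hac ▸ ha)
    · intro c' hcc
      rw [PySem.Dict.getD_insert]
      by_cases h' : c' = c
      · simp [h']
      · rw [if_neg h']
        exact hne c' (by rwa [PySem.Dict.contains_insert, beq_false_of_ne h',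
          Bool.false_or] at hcc)
    · intro c'
      rw [PySem.Dict.get?_insert, PySem.Dict.getD_insert]
      by_cases h' : c' = c
      · simp [h']
      · rw [if_neg h', if_neg h', hlast c']
    · intro c'
      rw [PySem.Dict.getD_insert]
      by_cases h' : c' = c
      · subst h'
        simp only [if_pos trivial]
        rw [show gapB [i] = false from rfl]
        simp only [Bool.false_eq_true, iff_false]
        rw [hlon c', h0]
        simp [gapB]
      · rw [if_neg h']
        exact hlon c'

lemma inv_foldl (ps : List (Int × Char)) (d : PySem.Dict Char (List Int))
    (last : PySem.Dict Char Int) (lonely : PySem.Set Char) (h : InvAB d last lonely) :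
    InvAB (ps.foldl aStep d) (ps.foldl bStep (last, lonely)).1 (ps.foldl bStep (last, lonely)).2 := by
  induction ps generalizing d last lonely with
  | nil => exact h
  | cons p ps ih =>
      simpa using ih _ (bStep (last, lonely) p).1 (bStep (last, lonely) p).2
        (by simpa using inv_step d last lonely p h)

lemma aScanGap_true_iff (l : List Int) (r : List Int) :
    aScanGap l r = true ↔ ∃ i ∈ r, PySem.List.pyGetD l (i + 1) 0 - PySem.List.pyGetD l i 0 > 1 := by
  induction r with
  | nil => simp [aScanGap]
  | cons i rest ih =>
      by_cases hi : PySem.List.pyGetD l (i + 1) 0 - PySem.List.pyGetD l i 0 > 1 <;>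
        simp [aScanGap, hi, ih]

lemma gapB_true_iff (l : List Int) :
    gapB l = true ↔ ∃ k : Nat, k + 1 < l.length ∧ l.getD (k + 1) 0 - l.getD k 0 > 1 := by
  induction l with
  | nil => simp [gapB]
  | cons a t ih =>
    cases t with
    | nil => simp [gapB]
    | cons b r =>
      rw [show gapB (a :: b :: r) = (decide (b - a > 1) || gapB (b :: r)) from rfl]
      simp only [Bool.or_eq_true, decide_eq_true_eq, ih]
      constructor
      · rintro (hgap | ⟨k, hk, hgt⟩)
        · exact ⟨0, by simp, by simpa using hgap⟩
        · exact ⟨k + 1, by simpa using hk, by simpa using hgt⟩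
      · rintro ⟨k, hk, hgt⟩
        cases k with
        | zero => exact Or.inl (by simpa using hgt)
        | succ k => exact Or.inr ⟨k, by simpa using hk, by simpa using hgt⟩

lemma scan_eq_gapB (l : List Int) :
    (decide (l.length ≥ 2) && aScanGap l (PySem.List.pyRange 0 ((l.length : Int) - 1) 1)) = gapB l := by
  have : ((l.length ≥ 2) ∧ aScanGap l (PySem.List.pyRange 0 ((l.length : Int) - 1) 1) = true)
      ↔ gapB l = true := by
    rw [aScanGap_true_iff, gapB_true_iff]
    constructor
    · rintro ⟨hlen, i, hi, hgt⟩
      rw [PySem.List.mem_pyRange_one] at hi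
      obtain ⟨hi0, hi1⟩ := hi
      refine ⟨i.toNat, by omega, ?_⟩
      rw [PySem.List.pyGetD_of_nonneg l 0 hi0, PySem.List.pyGetD_of_nonneg l 0 (by omega),
        show (i + 1).toNat = i.toNat + 1 by omega] at hgt
      exact hgt
    · rintro ⟨k, hk, hgt⟩
      refine ⟨by omega, (k : Int), ?_, ?_⟩
      · rw [PySem.List.mem_pyRange_one]
        constructor
        · exact Int.natCast_nonneg k
        · omega
      · rw [PySem.List.pyGetD_of_nonneg l 0 (Int.natCast_nonneg k),
          PySem.List.pyGetD_of_nonneg l 0 (by positivity),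
          show ((k : Int) + 1).toNat = k + 1 by omega, Int.toNat_natCast]
        exact hgt
  cases hb : (decide (l.length ≥ 2) && aScanGap l (PySem.List.pyRange 0 ((l.length : Int) - 1) 1)) with
  | false =>
      symm
      rw [← Bool.not_eq_true]
      intro hg
      have := this.mpr hg
      rw [Bool.and_eq_false_iff] at hb
      rcases hb with hb | hb
      · exact absurd this.1 (by simpa using hb)
      · exact absurd this.2 (by simp [hb])
  | true =>
      symm
      simp only [Bool.and_eq_true, decide_eq_true_eq] at hb
      exact this.mp hb

-- ===== VERDICT (by name: the statement is the Claim_ definition above) =====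
theorem solution_spec : Claim_equal_solution := by
  unfold Claim_equal_solution
  intro s _
  unfold Spec_solution solution solution_alt
  simp only []
  set ps := PySem.List.enumerate s.toList 0 with hps
  set d := ps.foldl aStep PySem.Dict.empty with hd
  set st := ps.foldl bStep (PySem.Dict.empty, PySem.Set.empty) with hst
  have hinv : InvAB d st.1 st.2 := by
    refine inv_foldl ps _ _ _ ⟨?_, ?_, ?_, ?_, ?_⟩
    · simp [PySem.Dict.empty, PySem.Dict.keys]
    · intro c hcc
      rw [PySem.Dict.contains_empty] at hcc
      cases hcc
    · intro c
      rw [PySem.Dict.get?_empty, PySem.Dict.getD_empty]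
      rfl
    · intro c
      simp [PySem.Set.empty, PySem.Dict.getD_empty, gapB]
    · simp [PySem.Set.empty]
  obtain ⟨hnd, hne, hlast, hlon, hsnd⟩ := hinv
  -- A's second loop is a filter of the dict's items
  have hfun : (fun (acc : List Char) (pr : Char × List Int) =>
        if pr.2.length ≥ 2 then
          (if aScanGap pr.2 (PySem.List.pyRange 0 ((pr.2.length : Int) - 1) 1) = true
           then acc ++ [pr.1] else acc)
        else acc)
      = fun acc pr => if gapB pr.2 = true then acc ++ [pr.1] else acc := by
    funext acc pr
    rw [← scan_eq_gapB pr.2]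
    by_cases h1 : pr.2.length ≥ 2 <;> simp [h1]
  rw [hfun, PySem.List.foldl_append_if (fun pr => gapB pr.2) Prod.fst, List.nil_append,
    PySem.Dict.items_eq_map_keys d hnd [], List.filter_map, List.map_map]
  have hmapid : (Prod.fst ∘ fun k => (k, d.getD k [])) = id := rfl
  rw [hmapid, List.map_id]
  set K := d.keys.filter ((fun pr : Char × List Int => gapB pr.2) ∘ fun k => (k, d.getD k []))
    with hK
  have hKmem : ∀ c, c ∈ K ↔ gapB (d.getD c []) = true := by
    intro c
    rw [hK, List.mem_filter]
    constructor
    · rintro ⟨_, hg⟩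
      simpa using hg
    · intro hg
      refine ⟨?_, by simpa using hg⟩
      rw [← PySem.Dict.contains_iff_mem_keys]
      by_contra hcf
      rw [PySem.Dict.getD_of_not_contains d [] (by simpa using hcf)] at hg
      cases hg
  have hperm : K.Perm st.2 := by
    rw [List.perm_ext_iff_of_nodup (List.Nodup.filter _ hnd) hsnd]
    intro c
    rw [hKmem c, hlon c]
  have hsorted : PySem.List.sorted K (fun x => x) false
      = PySem.List.sorted st.2 (fun x => x) false :=
    PySem.List.sorted_eq_sorted_of_perm K st.2 (fun x => x) (fun _ _ h => h) hperm
  by_cases hL : st.2 = []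
  · have hKnil : K = [] := by
      rw [hL] at hperm
      exact hperm.eq_nil
    rw [hKnil, hL]
    norm_num
    exact (PySem.List.sorted_eq_nil_iff [] _ false).mpr rfl
  · have hKne : K ≠ [] := fun h => hL (by rw [h] at hperm; exact hperm.symm.eq_nil)
    rw [if_neg hL, if_neg (by simpa [List.length_eq_zero_iff] using hKne), hsorted]
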